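-- pv_equiv track=rewrite | github.com/HyderZhang/streamlit | seatmap-browser.py | compute_seating_pattern
-- ===== SOURCE A (Python) =====
-- def compute_seating_pattern(seats_per_row):
--     """
--     根据“中间靠左优先，左右交替”规则计算排内座位填充顺序，
--     返回一个列表，表示每个参会者应填入的座位自然索引（0为最左侧）。
--     """
--     pattern = []
--     if seats_per_row % 2 == 0:
--         best_index = seats_per_row // 2 - 1
--         left = best_index
--         right = best_index + 1
--         toggle = True
--         while left >= 0 or right < seats_per_row:
--             if toggle and left >= 0:
--                 pattern.append(left)
--                 left -= 1
--             elif not toggle and right < seats_per_row: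
--                 pattern.append(right)
--                 right += 1
--             toggle = not toggle
--     else:
--         best_index = seats_per_row // 2
--         pattern.append(best_index)
--         left = best_index - 1
--         right = best_index + 1
--         toggle = True
--         while left >= 0 or right < seats_per_row:
--             if toggle and left >= 0:
--                 pattern.append(left)
--                 left -= 1
--             elif not toggle and right < seats_per_row:
--                 pattern.append(right)
--                 right += 1
--             toggle = not toggle
--     return pattern
-- ===== SOURCE B (Python) =====
-- def compute_seating_pattern(seats_per_row):
--     """Closed form: seat for the k-th participant computed directly from k's parity."""
--     n = seats_per_row
--     if n % 2 == 0:
--         best = n // 2 - 1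
--         return [best - i // 2 if i % 2 == 0 else best + (i + 1) // 2
--                 for i in range(n)]
--     best = n // 2
--     return [best] + [best + i // 2 if i % 2 == 0 else best - (i + 1) // 2
--                      for i in range(1, n)]
-- ===== Notes on version B (the rewrite author's own statement) =====
-- stated objective: simpler
-- what changed: Replaces A's stateful while-loop simulation with toggling left/right pointers by a closed-form per-position formula: each seat index is computed directly from the participant position's parity and its half, in a single comprehension.
import Mathlib
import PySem

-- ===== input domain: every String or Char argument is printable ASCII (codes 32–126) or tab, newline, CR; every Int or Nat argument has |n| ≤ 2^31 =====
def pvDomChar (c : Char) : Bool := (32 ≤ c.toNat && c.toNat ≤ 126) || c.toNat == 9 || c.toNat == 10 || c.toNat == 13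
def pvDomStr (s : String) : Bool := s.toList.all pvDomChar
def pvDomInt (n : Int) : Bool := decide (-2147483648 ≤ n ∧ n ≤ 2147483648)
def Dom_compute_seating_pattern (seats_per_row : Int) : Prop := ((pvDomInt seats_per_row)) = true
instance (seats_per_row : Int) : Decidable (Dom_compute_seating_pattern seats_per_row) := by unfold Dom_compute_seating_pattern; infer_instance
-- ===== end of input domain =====

-- B replaces A's toggling two-pointer while-loop by a closed-form per-position
-- formula mapped over range(n) (objective: simpler).

-- ===== PORT A =====
-- the while-loop of A: state (left, right, toggle), appending to `pattern`.
-- `fuel` only makes the loop total; the supplied fuel is proven sufficient below.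
def pvLoopA (n : Int) : Nat → Int → Int → Bool → List Int → List Int
  | 0, _, _, _, pattern => pattern
  | fuel + 1, left, right, toggle, pattern =>
    if left ≥ 0 ∨ right < n then
      if toggle = true ∧ left ≥ 0 then
        pvLoopA n fuel (left - 1) right (!toggle) (pattern ++ [left])
      else if toggle = false ∧ right < n then
        pvLoopA n fuel left (right + 1) (!toggle) (pattern ++ [right])
      else
        pvLoopA n fuel left right (!toggle) pattern
    else pattern

def compute_seating_pattern (seats_per_row : Int) : List Int :=
  -- best_index is inlined: even branch best_index = n//2 - 1, odd branch n//2
  if PySem.Int.mod seats_per_row 2 = 0 then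
    pvLoopA seats_per_row (2 * seats_per_row.toNat + 2)
      (PySem.Int.floordiv seats_per_row 2 - 1) (PySem.Int.floordiv seats_per_row 2 - 1 + 1) true []
  else
    pvLoopA seats_per_row (2 * seats_per_row.toNat + 2)
      (PySem.Int.floordiv seats_per_row 2 - 1) (PySem.Int.floordiv seats_per_row 2 + 1) true
      [PySem.Int.floordiv seats_per_row 2]

-- ===== PORT B =====
def compute_seating_pattern_alt (seats_per_row : Int) : List Int :=
  -- best is inlined: even branch best = n//2 - 1, odd branch n//2
  if PySem.Int.mod seats_per_row 2 = 0 then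
    (PySem.List.pyRange 0 seats_per_row 1).map (fun i =>
      if PySem.Int.mod i 2 = 0 then (PySem.Int.floordiv seats_per_row 2 - 1) - PySem.Int.floordiv i 2
      else (PySem.Int.floordiv seats_per_row 2 - 1) + PySem.Int.floordiv (i + 1) 2)
  else
    [PySem.Int.floordiv seats_per_row 2] ++ (PySem.List.pyRange 1 seats_per_row 1).map (fun i =>
      if PySem.Int.mod i 2 = 0 then PySem.Int.floordiv seats_per_row 2 + PySem.Int.floordiv i 2
      else PySem.Int.floordiv seats_per_row 2 - PySem.Int.floordiv (i + 1) 2)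

-- ===== PRECONDITION & SPEC =====
def Spec_compute_seating_pattern (seats_per_row : Int) (out : List Int) : Prop := out = compute_seating_pattern_alt seats_per_row
instance (seats_per_row : Int) (out : List Int) : Decidable (Spec_compute_seating_pattern seats_per_row out) := by unfold Spec_compute_seating_pattern; infer_instance

-- ===== CLAIM (what is proved, stated in full; the proofs are below) =====
def Claim_equal_compute_seating_pattern : Prop := ∀ (seats_per_row : Int), Dom_compute_seating_pattern seats_per_row → Spec_compute_seating_pattern seats_per_row (compute_seating_pattern seats_per_row)

-- ===== LEMMAS AND PROOFS =====

-- k interleaved countdown/countup pairs starting at (l, r): [l, r, l-1, r+1, …]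
def pvPairs : Nat → Int → Int → List Int
  | 0, _, _ => []
  | k + 1, l, r => l :: r :: pvPairs k (l - 1) (r + 1)

lemma pvPairs_congr (k : Nat) {l l' r r' : Int} (hl : l = l') (hr : r = r') :
    pvPairs k l r = pvPairs k l' r' := by rw [hl, hr]

-- A's loop, started with toggle = True on a balanced state, appends the pairs.
lemma pvLoopA_eq_pairs (n : Int) :
    ∀ (k fuel : Nat) (left right : Int) (pattern : List Int),
      (left + 1).toNat = k → n - right = left + 1 → 2 * k ≤ fuel →
      pvLoopA n fuel left right true pattern = pattern ++ pvPairs k left right := by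
  intro k
  induction k with
  | zero =>
    intro fuel left right pattern hk hbal _
    have hstop : ¬(left ≥ 0 ∨ right < n) := by omega
    cases fuel with
    | zero => simp [pvLoopA, pvPairs]
    | succ f => rw [pvLoopA, if_neg hstop]; simp [pvPairs]
  | succ k ih =>
    intro fuel left right pattern hk hbal hfuel
    have hl : 0 ≤ left := by omega
    have hr : right < n := by omega
    obtain ⟨f, rfl⟩ : ∃ f, fuel = f + 1 + 1 := ⟨fuel - 2, by omega⟩
    rw [pvLoopA, if_pos (Or.inl hl), if_pos (⟨rfl, hl⟩ : true = true ∧ left ≥ 0)]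
    simp only [Bool.not_true]
    rw [pvLoopA, if_pos (Or.inr hr : left - 1 ≥ 0 ∨ right < n),
      if_neg (by simp : ¬(false = true ∧ left - 1 ≥ 0)),
      if_pos (⟨rfl, hr⟩ : false = false ∧ right < n)]
    simp only [Bool.not_false]
    rw [ih f (left - 1) (right + 1) (pattern ++ [left] ++ [right]) (by omega) (by omega) (by omega)]
    simp [pvPairs]

-- the even-case comprehension over an even-aligned window equals the pairs
lemma pvMap_even (best : Int) :
    ∀ (k : Nat) (a : Int), 0 ≤ a → PySem.Int.mod a 2 = 0 →
      (PySem.List.pyRange a (a + 2 * k) 1).map (fun i =>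
          if PySem.Int.mod i 2 = 0 then best - PySem.Int.floordiv i 2
          else best + PySem.Int.floordiv (i + 1) 2)
        = pvPairs k (best - PySem.Int.floordiv a 2) (best + 1 + PySem.Int.floordiv a 2) := by
  intro k
  induction k with
  | zero =>
    intro a _ _
    rw [PySem.List.pyRange_one_eq_nil (by omega)]; simp [pvPairs]
  | succ k ih =>
    intro a ha hpar
    have h2 : (0:Int) < 2 := by norm_num
    rw [PySem.Int.mod_eq_emod_of_pos h2] at hpar
    rw [PySem.List.pyRange_one_cons (by omega), PySem.List.pyRange_one_cons (by omega)]
    simp only [List.map_cons]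
    have hbnd : (a + 2 * (((k:Nat) + 1 : Nat) : Int) : Int) = (a + 2) + 2 * (k:Nat) := by
      push_cast; ring
    rw [hbnd, show a + 1 + 1 = a + 2 by ring]
    rw [ih (a + 2) (by omega) (by rw [PySem.Int.mod_eq_emod_of_pos h2]; omega)]
    have hda : PySem.Int.floordiv a 2 = a / 2 := PySem.Int.floordiv_eq_ediv_of_pos h2
    have hda3 : PySem.Int.floordiv (a + 2) 2 = (a + 2) / 2 := PySem.Int.floordiv_eq_ediv_of_pos h2
    rw [if_pos (by rw [PySem.Int.mod_eq_emod_of_pos h2]; omega),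
        if_neg (by rw [PySem.Int.mod_eq_emod_of_pos h2]; omega)]
    simp only [pvPairs, hda, hda3, List.cons.injEq]
    exact ⟨trivial, by omega, pvPairs_congr k (by omega) (by omega)⟩

-- the odd-case comprehension over an odd-aligned window equals the pairs
lemma pvMap_odd (best : Int) :
    ∀ (k : Nat) (a : Int), 1 ≤ a → PySem.Int.mod a 2 = 1 →
      (PySem.List.pyRange a (a + 2 * k) 1).map (fun i =>
          if PySem.Int.mod i 2 = 0 then best + PySem.Int.floordiv i 2
          else best - PySem.Int.floordiv (i + 1) 2)
        = pvPairs k (best - PySem.Int.floordiv (a + 1) 2) (best + PySem.Int.floordiv (a + 1) 2) := by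
  intro k
  induction k with
  | zero =>
    intro a _ _
    rw [PySem.List.pyRange_one_eq_nil (by omega)]; simp [pvPairs]
  | succ k ih =>
    intro a ha hpar
    have h2 : (0:Int) < 2 := by norm_num
    rw [PySem.Int.mod_eq_emod_of_pos h2] at hpar
    rw [PySem.List.pyRange_one_cons (by omega), PySem.List.pyRange_one_cons (by omega)]
    simp only [List.map_cons]
    have hbnd : (a + 2 * (((k:Nat) + 1 : Nat) : Int) : Int) = (a + 2) + 2 * (k:Nat) := by
      push_cast; ring
    rw [hbnd, show a + 1 + 1 = a + 2 by ring]
    rw [ih (a + 2) (by omega) (by rw [PySem.Int.mod_eq_emod_of_pos h2]; omega)]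
    have hda1 : PySem.Int.floordiv (a + 1) 2 = (a + 1) / 2 := PySem.Int.floordiv_eq_ediv_of_pos h2
    have hda3 : PySem.Int.floordiv (a + 2 + 1) 2 = (a + 2 + 1) / 2 := PySem.Int.floordiv_eq_ediv_of_pos h2
    rw [if_neg (by rw [PySem.Int.mod_eq_emod_of_pos h2]; omega),
        if_pos (by rw [PySem.Int.mod_eq_emod_of_pos h2]; omega)]
    simp only [pvPairs, hda1, hda3, List.cons.injEq]
    exact ⟨trivial, trivial, pvPairs_congr k (by omega) (by omega)⟩

-- ===== VERDICT (by name: the statement is the Claim_ definition above) =====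
theorem compute_seating_pattern_spec : Claim_equal_compute_seating_pattern := by
  intro n _
  unfold Spec_compute_seating_pattern compute_seating_pattern compute_seating_pattern_alt
  have hq := PySem.Int.floordiv_mul_add_mod n 2
  have hm0 : 0 ≤ PySem.Int.mod n 2 := PySem.Int.mod_nonneg n (by norm_num)
  have hm2 : PySem.Int.mod n 2 < 2 := PySem.Int.mod_lt n (by norm_num)
  by_cases h : PySem.Int.mod n 2 = 0
  · rw [if_pos h, if_pos h]
    generalize hB : PySem.Int.floordiv n 2 - 1 = B at *
    have hn2 : n = 2 * B + 2 := by omega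
    rw [pvLoopA_eq_pairs n (B + 1).toNat _ _ _ _ rfl (by omega) (by omega)]
    by_cases hn : 0 ≤ n
    · rw [show n = 0 + 2 * (((B + 1).toNat : Nat) : Int) by omega]
      rw [pvMap_even B (B + 1).toNat 0 le_rfl (by decide)]
      simp
    · have hk : (B + 1).toNat = 0 := by omega
      rw [hk, PySem.List.pyRange_one_eq_nil (by omega)]
      simp [pvPairs]
  · rw [if_neg h, if_neg h]
    generalize hB : PySem.Int.floordiv n 2 = B at *
    have hn2 : n = 2 * B + 1 := by omega
    rw [pvLoopA_eq_pairs n (B - 1 + 1).toNat _ _ _ _ rfl (by omega) (by omega)]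
    by_cases hn : 1 ≤ n
    · rw [show n = 1 + 2 * (((B - 1 + 1).toNat : Nat) : Int) by omega]
      rw [pvMap_odd B (B - 1 + 1).toNat 1 le_rfl (by decide)]
      simp
    · have hk : (B - 1 + 1).toNat = 0 := by omega
      rw [hk, PySem.List.pyRange_one_eq_nil (by omega)]
      simp [pvPairs]
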